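-- pv_equiv track=rewrite | github.com/seahrh/cses-problem-set-python | src/sortingandsearching/reading_books.py | solve
-- ===== SOURCE A (Python) =====
-- from typing import List
--
-- def solve(books: List[int]) -> int:
--     books.sort()
--     right_sum: List[int] = [0] * len(books)
--     _sum = 0
--     for i in range(len(books) - 1, -1, -1):
--         _sum += books[i]
--         right_sum[i] = _sum
--     _sum = 0
--     # invariant: left partition can be empty but right partition must have at least 1 book
--     for i in range(len(books) - 1):
--         _sum += books[i]
--         if _sum >= right_sum[i + 1]:
--             return _sum + right_sum[i + 1]
--     return books[-1] * 2
-- ===== SOURCE B (Python) =====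
-- from typing import List
--
-- def solve(books: List[int]) -> int:
--     # One pass: the best split is always at one of the two extreme cut points,
--     # so only total, min and max are needed (raises ValueError on an empty list).
--     total = sum(books)
--     mx = max(books)
--     mn = min(books)
--     if len(books) > 1 and (total - mx >= mx or 2 * mn >= total):
--         return total
--     return 2 * mx
-- ===== Notes on version B (the rewrite author's own statement) =====
-- stated objective: faster
-- what changed: A sorts the list, builds a suffix-sum array and scans prefixes for a split point; B computes total, min and max in one pass and returns the closed-form answer (total if a balanced split exists at either extreme cut, else 2*max), with no sorting and no auxiliary array.
-- outside the precondition, e.g. on solve([]): A raises IndexError, B raises ValueError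
import Mathlib
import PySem

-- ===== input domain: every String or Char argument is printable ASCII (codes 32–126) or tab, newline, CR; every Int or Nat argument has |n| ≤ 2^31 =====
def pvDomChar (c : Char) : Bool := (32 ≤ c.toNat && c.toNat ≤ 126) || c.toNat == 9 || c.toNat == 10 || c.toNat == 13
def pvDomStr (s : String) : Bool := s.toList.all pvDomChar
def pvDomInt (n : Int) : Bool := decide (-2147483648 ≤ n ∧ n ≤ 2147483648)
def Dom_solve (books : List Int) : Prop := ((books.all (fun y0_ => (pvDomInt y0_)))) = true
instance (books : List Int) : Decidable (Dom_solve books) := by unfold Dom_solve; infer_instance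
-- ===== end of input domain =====

-- B replaces A's sort + suffix-sum array + prefix scan by a single pass computing
-- total/min/max and a closed-form answer (objective: faster, O(n) vs O(n log n)).
-- Note: the Python A sorts `books` in place; the equivalence proved here is about
-- the RETURN value only (B does not mutate its argument).

-- ===== PORT A =====
def solve (books : List Int) : Int :=
  let s := PySem.List.sorted books (fun x => x) false      -- books.sort()
  let n : Int := (s.length : Int)
  -- right_sum = [0] * len(books); backwards loop filling suffix sums
  let p1 := (PySem.List.pyRange (n - 1) (-1) (-1)).foldl
      (fun (st : List Int × Int) i =>
        let sum := st.2 + PySem.List.pyGetD s i 0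
        (PySem.List.pySetD st.1 i sum, sum))
      (List.replicate s.length 0, 0)
  let rs := p1.1
  -- forward loop with early return, simulated by an Option in the state
  let p2 := (PySem.List.pyRange 0 (n - 1) 1).foldl
      (fun (st : Option Int × Int) i =>
        match st.1 with
        | some _ => st
        | none =>
          let sum := st.2 + PySem.List.pyGetD s i 0
          if PySem.List.pyGetD rs (i + 1) 0 ≤ sum then
            (some (sum + PySem.List.pyGetD rs (i + 1) 0), sum)
          else (none, sum))
      (none, 0)
  match p2.1 with
  | some r => r
  | none => PySem.List.pyGetD s (-1) 0 * 2                 -- books[-1] * 2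

-- ===== PORT B =====
def solve_alt (books : List Int) : Int :=
  let total := books.sum
  match PySem.List.max? books (fun x => x), PySem.List.min? books (fun x => x) with
  | some mx, some mn =>
      if 1 < books.length ∧ (mx ≤ total - mx ∨ total ≤ 2 * mn) then total else 2 * mx
  | _, _ => 0          -- unreachable under Pre_solve (max/min of [] raise)

-- ===== PRECONDITION & SPEC =====
-- Pre_ excludes only the empty list, on which A raises IndexError (books[-1]) and
-- B raises ValueError (max of empty sequence).
def Pre_solve (books : List Int) : Prop := books ≠ []
instance (books : List Int) : Decidable (Pre_solve books) := by unfold Pre_solve; infer_instance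
def pvWitness_solve : List Int := [4, 2, 5]

def Spec_solve (books : List Int) (out : Int) : Prop := out = solve_alt books
instance (books : List Int) (out : Int) : Decidable (Spec_solve books out) := by unfold Spec_solve; infer_instance

-- ===== CLAIM (what is proved, stated in full; the proofs are below) =====
def Claim_equal_solve : Prop := ∀ (books : List Int), Dom_solve books → Pre_solve books → Spec_solve books (solve books)

-- ===== LEMMAS AND PROOFS =====

-- prefix sum P s k = sum of the first k books
def pvP (s : List Int) (k : Nat) : Int := (s.take k).sum

theorem pvP_succ (s : List Int) (k : Nat) (h : k < s.length) :
    pvP s (k + 1) = pvP s k + s[k] := by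
  simp [pvP, List.sum_take_succ _ _ h]

theorem pvP_length (s : List Int) : pvP s s.length = s.sum := by
  simp [pvP]

theorem pvP_add_drop (s : List Int) (k : Nat) :
    pvP s k + (s.drop k).sum = s.sum := by
  simpa [pvP] using (List.sum_take_add_sum_drop s k)

-- if the prefix sums strictly grow over [a,b), some book in [a,b) is positive
theorem pvP_anti (s : List Int) (a b : Nat) (hab : a ≤ b) (hb : b ≤ s.length)
    (h : ∀ j (hj : j < s.length), a ≤ j → j < b → s[j] ≤ 0) : pvP s b ≤ pvP s a := by
  induction b, hab using Nat.le_induction with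
  | base => exact le_rfl
  | succ n hn ih =>
    have hnlen : n < s.length := by omega
    rw [pvP_succ s n hnlen]
    have h1 : s[n] ≤ 0 := h n hnlen hn (by omega)
    have h2 : pvP s n ≤ pvP s a := ih (by omega) (fun j hj h3 h4 => h j hj h3 (by omega))
    omega

theorem pvExists_pos (s : List Int) (a b : Nat) (hab : a ≤ b) (hb : b ≤ s.length)
    (h : pvP s a < pvP s b) : ∃ j, a ≤ j ∧ j < b ∧ ∃ (hj : j < s.length), 0 < s[j] := by
  by_contra hc
  push_neg at hc
  have := pvP_anti s a b hab hb (fun j hj h3 h4 => by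
    have := hc j h3 h4 hj
    omega)
  omega

-- if all books in [a,b) are nonnegative, prefix sums are monotone
theorem pvP_mono (s : List Int) (a b : Nat) (hab : a ≤ b) (hb : b ≤ s.length)
    (h : ∀ j (hj : j < s.length), a ≤ j → j < b → 0 ≤ s[j]) : pvP s a ≤ pvP s b := by
  induction b, hab using Nat.le_induction with
  | base => exact le_rfl
  | succ n hn ih =>
    have hnlen : n < s.length := by omega
    rw [pvP_succ s n hnlen]
    have h1 : 0 ≤ s[n] := h n hnlen hn (by omega)
    have h2 : pvP s a ≤ pvP s n := ih (by omega) (fun j hj h3 h4 => h j hj h3 (by omega))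
    omega

-- the suffix-sum loop of A produces the list of suffix sums
theorem pvRsLoop (s : List Int) (k : Nat) : ∀ (lst : List Int), lst.length = s.length → k ≤ s.length →
    ((PySem.List.pyRange ((k : Int) - 1) (-1) (-1)).foldl
      (fun (st : List Int × Int) i =>
        let sum := st.2 + PySem.List.pyGetD s i 0
        (PySem.List.pySetD st.1 i sum, sum))
      (lst, (s.drop k).sum)).1
    = (List.range s.length).map (fun i => if i < k then (s.drop i).sum else lst.getD i 0) := by
  induction k with
  | zero =>
    intro lst hlen _
    rw [PySem.List.pyRange_neg_one_eq_nil (by omega)]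
    simp only [List.foldl_nil]
    apply List.ext_getElem
    · simp [hlen]
    · intro i h1 h2
      simp only [List.getElem_map, List.getElem_range, Nat.not_lt_zero, if_false]
      exact (List.getD_eq_getElem _ _ h1).symm
  | succ k ih =>
    intro lst hlen hk
    have hcast : ((k + 1 : Nat) : Int) - 1 = (k : Int) := by push_cast; ring
    rw [hcast, PySem.List.pyRange_neg_one_cons (by omega)]
    simp only [List.foldl_cons]
    have hklen : k < s.length := by omega
    have hget : PySem.List.pyGetD s (k : Int) 0 = s[k] := by
      rw [PySem.List.pyGetD_natCast]; exact List.getD_eq_getElem _ _ hklen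
    have hdrop : (s.drop (k + 1)).sum + s[k] = (s.drop k).sum := by
      rw [List.drop_eq_getElem_cons hklen, List.sum_cons]; ring
    have hres := ih (lst.set k ((s.drop k).sum)) (by simp [hlen]) (by omega)
    have hcast2 : (k : Int) - 1 = ((k : Nat) : Int) - 1 := rfl
    simp only [hget, hdrop]
    rw [show PySem.List.pySetD lst (k : Int) ((s.drop k).sum) = lst.set k ((s.drop k).sum) from
      PySem.List.pySetD_natCast lst k _]
    rw [hres]
    apply List.map_congr_left
    intro i hi
    simp only [List.mem_range] at hi
    by_cases h1 : i < k
    · simp only [if_pos h1, if_pos (show i < k + 1 by omega)]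
    · by_cases h2 : i = k
      · subst h2
        have hl : i < (lst.set i ((s.drop i).sum)).length := by simpa [hlen] using hklen
        rw [if_neg h1, if_pos (show i < i + 1 by omega), List.getD_eq_getElem _ _ hl,
            List.getElem_set_self]
      · have h3 : ¬ i < k + 1 := by omega
        simp only [h1, h3, if_false]
        rw [List.getD_eq_getElem _ _ (show i < (lst.set k ((s.drop k).sum)).length by simpa [hlen] using hi),
            List.getD_eq_getElem _ _ (show i < lst.length by simpa [hlen] using hi),
            List.getElem_set_ne (by omega)]


-- once the early-return Option is set, the forward loop is the identity
theorem pvLoopAbsorb (s rs : List Int) (l : List Int) (r x : Int) :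
    (l.foldl
      (fun (st : Option Int × Int) i =>
        match st.1 with
        | some _ => st
        | none =>
          let sum := st.2 + PySem.List.pyGetD s i 0
          if PySem.List.pyGetD rs (i + 1) 0 ≤ sum then
            (some (sum + PySem.List.pyGetD rs (i + 1) 0), sum)
          else (none, sum))
      (some r, x)) = (some r, x) := by
  induction l with
  | nil => rfl
  | cons y t ih => simpa using ih

theorem pvLoopNone (s rs : List Int)
    (hrs : ∀ j : Nat, j < s.length → PySem.List.pyGetD rs (j : Int) 0 = (s.drop j).sum) :
    ∀ (m a : Nat), s.length - 1 = a + m →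
    (∀ i, a ≤ i → i + 1 < s.length → ¬ ((s.drop (i + 1)).sum ≤ pvP s (i + 1))) →
    ((PySem.List.pyRange (a : Int) ((s.length : Int) - 1) 1).foldl
      (fun (st : Option Int × Int) i =>
        match st.1 with
        | some _ => st
        | none =>
          let sum := st.2 + PySem.List.pyGetD s i 0
          if PySem.List.pyGetD rs (i + 1) 0 ≤ sum then
            (some (sum + PySem.List.pyGetD rs (i + 1) 0), sum)
          else (none, sum))
      (none, pvP s a)) = (none, pvP s (s.length - 1)) := by
  intro m
  induction m with
  | zero =>
    intro a hm _
    rw [PySem.List.pyRange_one_eq_nil (by omega)]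
    simp only [List.foldl_nil]
    have : a = s.length - 1 := by omega
    rw [this]
  | succ m ih =>
    intro a hm hno
    have halen : a + 1 < s.length := by omega
    rw [PySem.List.pyRange_one_cons (by push_cast; omega)]
    simp only [List.foldl_cons]
    have hget : PySem.List.pyGetD s (a : Int) 0 = s[a] := by
      rw [PySem.List.pyGetD_natCast]; exact List.getD_eq_getElem _ _ (by omega)
    have hcast : ((a : Int) + 1) = ((a + 1 : Nat) : Int) := by omega
    have hsum : pvP s a + PySem.List.pyGetD s (a : Int) 0 = pvP s (a + 1) := by
      rw [hget, pvP_succ s a (by omega)]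
    have hcond : ¬ (PySem.List.pyGetD rs (((a + 1 : Nat) : Int)) 0 ≤ pvP s (a + 1)) := by
      rw [hrs (a + 1) halen]
      exact hno a (le_refl a) halen
    simp only [hsum, hcast]
    rw [if_neg hcond]
    exact ih (a + 1) (by omega) (fun i h1 h2 => hno i (by omega) h2)


theorem pvLoopSome (s rs : List Int)
    (hrs : ∀ j : Nat, j < s.length → PySem.List.pyGetD rs (j : Int) 0 = (s.drop j).sum) :
    ∀ (m a : Nat), s.length - 1 = a + m →
    (∃ i, a ≤ i ∧ i + 1 < s.length ∧ (s.drop (i + 1)).sum ≤ pvP s (i + 1)) →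
    ((PySem.List.pyRange (a : Int) ((s.length : Int) - 1) 1).foldl
      (fun (st : Option Int × Int) i =>
        match st.1 with
        | some _ => st
        | none =>
          let sum := st.2 + PySem.List.pyGetD s i 0
          if PySem.List.pyGetD rs (i + 1) 0 ≤ sum then
            (some (sum + PySem.List.pyGetD rs (i + 1) 0), sum)
          else (none, sum))
      (none, pvP s a)).1 = some s.sum := by
  intro m
  induction m with
  | zero =>
    intro a hm hyes
    obtain ⟨i, h1, h2, _⟩ := hyes
    omega
  | succ m ih =>
    intro a hm hyes
    have halen : a + 1 < s.length := by
      obtain ⟨i, h1, h2, _⟩ := hyes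
      omega
    rw [PySem.List.pyRange_one_cons (by push_cast; omega)]
    simp only [List.foldl_cons]
    have hget : PySem.List.pyGetD s (a : Int) 0 = s[a]'(by omega) := by
      rw [PySem.List.pyGetD_natCast]; exact List.getD_eq_getElem _ _ (by omega)
    have hcast : ((a : Int) + 1) = ((a + 1 : Nat) : Int) := by omega
    have hsum : pvP s a + PySem.List.pyGetD s (a : Int) 0 = pvP s (a + 1) := by
      rw [hget, pvP_succ s a (by omega)]
    by_cases hc : (s.drop (a + 1)).sum ≤ pvP s (a + 1)
    · have hcond : PySem.List.pyGetD rs (((a + 1 : Nat) : Int)) 0 ≤ pvP s (a + 1) := by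
        rw [hrs (a + 1) halen]; exact hc
      simp only [hsum, hcast]
      rw [if_pos hcond, hrs (a + 1) halen, pvLoopAbsorb]
      simp [pvP_add_drop s (a + 1)]
    · have hcond : ¬ (PySem.List.pyGetD rs (((a + 1 : Nat) : Int)) 0 ≤ pvP s (a + 1)) := by
        rw [hrs (a + 1) halen]; exact hc
      simp only [hsum, hcast]
      rw [if_neg hcond]
      apply ih (a + 1) (by omega)
      obtain ⟨i, h1, h2, h3⟩ := hyes
      refine ⟨i, ?_, h2, h3⟩
      rcases Nat.eq_or_lt_of_le h1 with h | h
      · subst h; exact absurd h3 hc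
      · omega

theorem solve_spec' : ∀ (books : List Int), Pre_solve books → solve books = solve_alt books := by
  intro books hpre
  unfold Pre_solve at hpre
  simp only [solve, solve_alt]
  set s := PySem.List.sorted books (fun x => x) false with hsdef
  have hperm : s.Perm books := PySem.List.sorted_perm books (fun x => x) false
  have hlen : s.length = books.length := hperm.length_eq
  have hLpos : 0 < s.length := by
    cases hb : books with
    | nil => exact absurd hb hpre
    | cons x t => rw [hlen, hb]; simp
  have hsum : s.sum = books.sum := hperm.sum_eq
  have hmono : ∀ (p q : Nat) (hpq : p ≤ q) (hq : q < s.length), s[p]'(by omega) ≤ s[q] := by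
    intro p q hpq hq
    rcases Nat.eq_or_lt_of_le hpq with h | h
    · subst h; exact le_refl _
    · exact (List.pairwise_iff_getElem.mp (PySem.List.sorted_pairwise books (fun x => x))) p q _ hq h
  have hL1 : s.length - 1 < s.length := by omega
  -- max? and min? of books are the last / first element of s
  rcases hmax : PySem.List.max? books (fun x => x) with _ | mx
  · exact absurd ((PySem.List.max?_eq_none_iff books _).mp hmax) hpre
  rcases hmin : PySem.List.min? books (fun x => x) with _ | mn
  · exact absurd ((PySem.List.min?_eq_none_iff books _).mp hmin) hpre
  have hmxval : mx = s[s.length - 1]'hL1 := by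
    obtain ⟨j, hj, hjeq⟩ := List.mem_iff_getElem.mp (hperm.mem_iff.mpr (PySem.List.max?_mem hmax))
    apply le_antisymm
    · rw [← hjeq]; exact hmono j (s.length - 1) (by omega) hL1
    · exact PySem.List.max?_isMax hmax _ (hperm.mem_iff.mp (List.getElem_mem hL1))
  have hmnval : mn = s[0]'hLpos := by
    obtain ⟨j, hj, hjeq⟩ := List.mem_iff_getElem.mp (hperm.mem_iff.mpr (PySem.List.min?_mem hmin))
    apply le_antisymm
    · exact PySem.List.min?_isMin hmin _ (hperm.mem_iff.mp (List.getElem_mem hLpos))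
    · rw [← hjeq]; exact hmono 0 j (by omega) hj
  -- prefix-sum bookkeeping
  have e0 : pvP s 0 = 0 := by simp [pvP]
  have e1 : pvP s 1 = s[0]'hLpos := by have := pvP_succ s 0 hLpos; rw [e0] at this; simpa using this
  have eL1 : pvP s (s.length - 1) + s[s.length - 1]'hL1 = s.sum := by
    have h1 := pvP_succ s (s.length - 1) hL1
    rw [show s.length - 1 + 1 = s.length by omega, pvP_length] at h1
    omega
  -- the suffix-sum list computed by A's first loop
  have hrs0 := pvRsLoop s s.length (List.replicate s.length 0) (by simp) le_rfl
  rw [List.drop_length, List.sum_nil] at hrs0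
  have hrs : ∀ j : Nat, j < s.length →
      PySem.List.pyGetD ((PySem.List.pyRange ((s.length : Int) - 1) (-1) (-1)).foldl
        (fun (st : List Int × Int) i =>
          let sum := st.2 + PySem.List.pyGetD s i 0
          (PySem.List.pySetD st.1 i sum, sum))
        (List.replicate s.length 0, 0)).1 (j : Int) 0 = (s.drop j).sum := by
    intro j hj
    rw [hrs0, PySem.List.pyGetD_natCast, List.getD_eq_getElem _ _ (by simpa using hj)]
    simp [hj]
  have hpre2 : s ≠ [] := List.ne_nil_of_length_pos hLpos
  by_cases hone : s.length = 1
  · -- single book: the forward loop is empty, A returns books[-1] * 2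
    rw [show ((s.length : Int) - 1) = 0 by omega]
    rw [PySem.List.pyRange_one_eq_nil (le_refl 0)]
    simp only [List.foldl_nil]
    rw [PySem.List.pyGetD_neg_one s 0 hpre2, List.getLast_eq_getElem]
    rw [if_neg (fun h => by omega : ¬ (1 < books.length ∧ (mx ≤ books.sum - mx ∨ books.sum ≤ 2 * mn)))]
    rw [hmxval]; ring
  · have hL2 : 2 ≤ s.length := by omega
    by_cases hex : ∃ i : Nat, i + 1 < s.length ∧ (s.drop (i + 1)).sum ≤ pvP s (i + 1)
    · -- the loop returns early: A returns the total; B's condition holds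
      obtain ⟨i, hi1, hi2⟩ := hex
      have hloop := pvLoopSome s _ hrs (s.length - 1) 0 (by omega) ⟨i, Nat.zero_le i, hi1, hi2⟩
      simp only [Nat.cast_zero, e0] at hloop
      rw [hloop]
      show s.sum = if 1 < books.length ∧ (mx ≤ books.sum - mx ∨ books.sum ≤ 2 * mn) then books.sum else 2 * mx
      have hcond : 1 < books.length ∧ (mx ≤ books.sum - mx ∨ books.sum ≤ 2 * mn) := by
        refine ⟨by omega, ?_⟩
        have htot : s.sum ≤ 2 * pvP s (i + 1) := by
          have := pvP_add_drop s (i + 1); omega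
        by_cases h01 : pvP s (i + 1) ≤ pvP s 1
        · right; rw [hmnval]; omega
        · left
          obtain ⟨j, hj1, hj2, hjl, hjpos⟩ :=
            pvExists_pos s 1 (i + 1) (by omega) (by omega) (by omega)
          have hup : pvP s (i + 1) ≤ pvP s (s.length - 1) :=
            pvP_mono s (i + 1) (s.length - 1) (by omega) (by omega)
              (fun l hl h3 h4 => le_of_lt (lt_of_lt_of_le hjpos (hmono j l (by omega) hl)))
          rw [hmxval]; omega
      rw [if_pos hcond]
      exact hsum
    · -- no early return: A returns 2 * last; B's condition fails
      have hloop := pvLoopNone s _ hrs (s.length - 1) 0 (by omega)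
        (fun i h1 h2 hc => hex ⟨i, h2, hc⟩)
      simp only [Nat.cast_zero, e0] at hloop
      rw [hloop]
      show PySem.List.pyGetD s (-1) 0 * 2
          = if 1 < books.length ∧ (mx ≤ books.sum - mx ∨ books.sum ≤ 2 * mn) then books.sum else 2 * mx
      rw [PySem.List.pyGetD_neg_one s 0 hpre2, List.getLast_eq_getElem]
      have hcond : ¬ (1 < books.length ∧ (mx ≤ books.sum - mx ∨ books.sum ≤ 2 * mn)) := by
        rintro ⟨h1, h2 | h2⟩
        · refine hex ⟨s.length - 2, by omega, ?_⟩
          rw [show s.length - 2 + 1 = s.length - 1 by omega]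
          have hd := pvP_add_drop s (s.length - 1)

          rw [hmxval] at h2
          omega
        · refine hex ⟨0, by omega, ?_⟩
          show (s.drop 1).sum ≤ pvP s 1
          have hd := pvP_add_drop s 1
          rw [hmnval] at h2
          omega
      rw [if_neg hcond]
      rw [hmxval]; ring

-- ===== VERDICT (by name: the statement is the Claim_ definition above) =====
theorem solve_spec : Claim_equal_solve := by
  intro books _ hpre
  unfold Spec_solve
  exact solve_spec' books hpre
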